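-- pv_equiv track=rewrite | github.com/aadigwe/syntax-prosody-CU | features/add_wordlevel.py | func_HEPW
-- ===== SOURCE A (Python) =====
-- def func_HEPW(list_of_const, sent_list):
--     '''
--     Returns an array of tuples for each word in the sentence and the HBCW
--     HEPW Highest-level phrase ending with the previous word if it has else NONE
--     '''
--     HEPW = []
--     for i in range(len(sent_list)):
--         wd = sent_list[i-1]
--         curr_wd = sent_list[i]
--         const_with_wd = [const for const in list_of_const if (const[1].split(" ")[-1] == wd and const[0] != "S")]
--         if const_with_wd:
--             tag = max(const_with_wd, key=lambda x: len(x[1].split(" ")))[0]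
--             HEPW.append((curr_wd,tag))
--         else:
--             HEPW.append((curr_wd,'NONE'))
--     return HEPW
-- ===== SOURCE B (Python) =====
-- def func_HEPW(list_of_const, sent_list):
--     best = {}
--     for tag, span in list_of_const:
--         if tag == "S":
--             continue
--         words = span.split(" ")
--         w = words[-1]
--         n = len(words)
--         if w not in best or best[w][1] < n:
--             best[w] = (tag, n)
--     prev = sent_list[-1:] + sent_list[:-1]
--     return [(cur, best[p][0] if p in best else 'NONE')
--             for p, cur in zip(prev, sent_list)]
-- ===== Notes on version B (the rewrite author's own statement) =====
-- stated objective: faster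
-- what changed: Replaces the per-word rescan of list_of_const (filter + max by phrase length for every sentence position) with a single pass that builds a dict mapping each constituent's last word to its longest-phrase tag, then one O(1) lookup per word.
import Mathlib
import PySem

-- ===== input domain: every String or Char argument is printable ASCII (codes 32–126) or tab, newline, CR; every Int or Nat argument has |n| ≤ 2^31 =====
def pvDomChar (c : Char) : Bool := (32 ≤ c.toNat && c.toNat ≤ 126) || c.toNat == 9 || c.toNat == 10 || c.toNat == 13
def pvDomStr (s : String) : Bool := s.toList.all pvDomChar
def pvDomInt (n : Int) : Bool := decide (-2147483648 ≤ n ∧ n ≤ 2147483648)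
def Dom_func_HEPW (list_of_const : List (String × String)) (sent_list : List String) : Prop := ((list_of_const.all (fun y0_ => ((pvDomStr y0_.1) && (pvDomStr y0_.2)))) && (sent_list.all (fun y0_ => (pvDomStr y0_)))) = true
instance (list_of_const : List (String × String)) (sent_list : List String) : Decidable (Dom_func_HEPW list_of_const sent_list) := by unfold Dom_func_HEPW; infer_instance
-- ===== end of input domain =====

-- B replaces A's per-word rescan of list_of_const by a dict (last word -> longest-phrase tag)
-- built in one pass, then one lookup per word; measured faster. Same return value.

-- ===== PORT A =====
-- s.split(" ") (sep ≠ "", so split? is always some; the default is never used)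
def pvSplitW (s : String) : List String := (PySem.Str.split? s " ").getD [""]
-- const[1].split(" ")[-1]  (split(" ") is never empty, so the default is never used)
def pvLastW (s : String) : String := PySem.List.pyGetD (pvSplitW s) (-1) ""
-- key=lambda x: len(x[1].split(" "))
def pvKey (c : String × String) : Int := (pvSplitW c.2).length

def func_HEPW (list_of_const : List (String × String)) (sent_list : List String) : List (String × String) :=
  (PySem.List.pyRange 0 (sent_list.length : Int) 1).foldl (fun HEPW i =>
    let wd := PySem.List.pyGetD sent_list (i - 1) ""
    let curr_wd := PySem.List.pyGetD sent_list i ""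
    let const_with_wd := list_of_const.filter (fun c => pvLastW c.2 == wd && c.1 != "S")
    match PySem.List.max? const_with_wd pvKey with
    | some m => HEPW ++ [(curr_wd, m.1)]
    | none => HEPW ++ [(curr_wd, "NONE")]) []

-- ===== PORT B =====
-- the loop body of B's dict-building pass
def pvStep (d : PySem.Dict String (String × Int)) (c : String × String) : PySem.Dict String (String × Int) :=
  if c.1 == "S" then d
  else
    let ws := pvSplitW c.2
    let w := PySem.List.pyGetD ws (-1) ""
    let n : Int := ws.length
    match d.get? w with
    | none => d.insert w (c.1, n)
    | some p => if p.2 < n then d.insert w (c.1, n) else d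

-- one pass over list_of_const: last word -> (tag, split length) of its first longest phrase
def pvBuildBest (list_of_const : List (String × String)) : PySem.Dict String (String × Int) :=
  list_of_const.foldl pvStep PySem.Dict.empty

def pvTagOf (best : PySem.Dict String (String × Int)) (w : String) : String :=
  match best.get? w with
  | some p => p.1
  | none => "NONE"

def func_HEPW_alt (list_of_const : List (String × String)) (sent_list : List String) : List (String × String) :=
  let best := pvBuildBest list_of_const
  let prev := PySem.List.slice sent_list (some (-1)) none ++ PySem.List.slice sent_list none (some (-1))
  (prev.zip sent_list).map (fun pc => (pc.2, pvTagOf best pc.1))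

-- ===== PRECONDITION & SPEC =====
def Spec_func_HEPW (list_of_const : List (String × String)) (sent_list : List String) (out : List (String × String)) : Prop := out = func_HEPW_alt list_of_const sent_list
instance (list_of_const : List (String × String)) (sent_list : List String) (out : List (String × String)) : Decidable (Spec_func_HEPW list_of_const sent_list out) := by unfold Spec_func_HEPW; infer_instance

-- ===== CLAIM (what is proved, stated in full; the proofs are below) =====
def Claim_equal_func_HEPW : Prop := ∀ (list_of_const : List (String × String)) (sent_list : List String), Dom_func_HEPW list_of_const sent_list → Spec_func_HEPW list_of_const sent_list (func_HEPW list_of_const sent_list)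

-- ===== LEMMAS AND PROOFS =====

-- A's per-word selection, named for the proofs
def pvSel (list_of_const : List (String × String)) (w : String) : Option (String × String) :=
  PySem.List.max? (list_of_const.filter (fun c => pvLastW c.2 == w && c.1 != "S")) pvKey

def pvSel' (list_of_const : List (String × String)) (w : String) : List (String × String) :=
  list_of_const.filter (fun c => pvLastW c.2 == w && c.1 != "S")

theorem pvMax_app_none (xs : List (String × String)) (c : String × String)
    (h : PySem.List.max? xs pvKey = none) :
    PySem.List.max? (xs ++ [c]) pvKey = some c := by
  simp only [PySem.List.max?] at h ⊢
  rw [List.foldl_append, h]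
  rfl

theorem pvMax_app_some (xs : List (String × String)) (c m : String × String)
    (h : PySem.List.max? xs pvKey = some m) :
    PySem.List.max? (xs ++ [c]) pvKey = if pvKey m < pvKey c then some c else some m := by
  simp only [PySem.List.max?] at h ⊢
  rw [List.foldl_append, h]
  rfl

-- the dict built by B answers exactly A's filter-and-max query
theorem pvBest_get (list_of_const : List (String × String)) (w : String) :
    (pvBuildBest list_of_const).get? w = (pvSel list_of_const w).map (fun m => (m.1, pvKey m)) := by
  induction list_of_const using List.reverseRecOn with
  | nil => simp [pvBuildBest, pvSel, PySem.List.max?, PySem.Dict.get?_empty]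
  | append_singleton l c ih =>
    have hb : pvBuildBest (l ++ [c]) = pvStep (pvBuildBest l) c := by
      simp [pvBuildBest, List.foldl_append]
    have hsel : pvSel (l ++ [c]) w =
        PySem.List.max? (pvSel' l w ++ List.filter (fun c => pvLastW c.2 == w && c.1 != "S") [c]) pvKey := by
      simp [pvSel, pvSel', List.filter_append]
    by_cases hS : c.1 = "S"
    · have hf : List.filter (fun c => pvLastW c.2 == w && c.1 != "S") [c] = [] := by
        simp [hS]
      rw [hb, hsel, hf, List.append_nil]
      have hstep : pvStep (pvBuildBest l) c = pvBuildBest l := by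
        simp [pvStep, hS]
      rw [hstep]
      exact ih
    · have hstep : pvStep (pvBuildBest l) c =
          match (pvBuildBest l).get? (pvLastW c.2) with
          | none => (pvBuildBest l).insert (pvLastW c.2) (c.1, pvKey c)
          | some p => if p.2 < pvKey c then (pvBuildBest l).insert (pvLastW c.2) (c.1, pvKey c) else pvBuildBest l := by
        have hS' : (c.1 == "S") = false := by simp [hS]
        rw [pvStep, hS']
        rfl
      by_cases hw : pvLastW c.2 = w
      · have hf : List.filter (fun c => pvLastW c.2 == w && c.1 != "S") [c] = [c] := by
          simp [hw, hS]
        rw [hb, hsel, hf, hstep, hw, ih]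
        cases hsl : pvSel l w with
        | none =>
          rw [pvMax_app_none (pvSel' l w) c hsl]
          show ((pvBuildBest l).insert w (c.1, pvKey c)).get? w = _
          rw [PySem.Dict.get?_insert_self]
          rfl
        | some m =>
          rw [pvMax_app_some (pvSel' l w) c m hsl]
          by_cases hlt : pvKey m < pvKey c
          · rw [if_pos hlt]
            show (if (m.1, pvKey m).2 < pvKey c then (pvBuildBest l).insert w (c.1, pvKey c) else pvBuildBest l).get? w = _
            rw [if_pos hlt, PySem.Dict.get?_insert_self]
            rfl
          · rw [if_neg hlt]
            show (if (m.1, pvKey m).2 < pvKey c then (pvBuildBest l).insert w (c.1, pvKey c) else pvBuildBest l).get? w = _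
            rw [if_neg hlt, ih, hsl]
      · have hf : List.filter (fun c => pvLastW c.2 == w && c.1 != "S") [c] = [] := by
          simp [hw]
        rw [hb, hsel, hf, List.append_nil, hstep,
            show PySem.List.max? (pvSel' l w) pvKey = pvSel l w from rfl]
        have hne : w ≠ pvLastW c.2 := fun h => hw h.symm
        cases hg : (pvBuildBest l).get? (pvLastW c.2) with
        | none =>
          show ((pvBuildBest l).insert (pvLastW c.2) (c.1, pvKey c)).get? w = _
          rw [PySem.Dict.get?_insert_of_ne _ _ hne]; exact ih
        | some p =>
          by_cases hlt : p.2 < pvKey c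
          · show (if p.2 < pvKey c then (pvBuildBest l).insert (pvLastW c.2) (c.1, pvKey c) else pvBuildBest l).get? w = _
            rw [if_pos hlt, PySem.Dict.get?_insert_of_ne _ _ hne]; exact ih
          · show (if p.2 < pvKey c then (pvBuildBest l).insert (pvLastW c.2) (c.1, pvKey c) else pvBuildBest l).get? w = _
            rw [if_neg hlt]; exact ih

theorem pvTag_eq (list_of_const : List (String × String)) (wd : String) :
    (match pvSel list_of_const wd with
      | some m => m.1
      | none => "NONE") = pvTagOf (pvBuildBest list_of_const) wd := by
  rw [pvTagOf, pvBest_get]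
  cases pvSel list_of_const wd <;> simp

-- both sides as a map over List.range
def pvEntry (loc : List (String × String)) (sl : List String) (k : Nat) : String × String :=
  (PySem.List.pyGetD sl (k : Int) "",
   pvTagOf (pvBuildBest loc) (PySem.List.pyGetD sl ((k : Int) - 1) ""))

theorem pvA_map (loc : List (String × String)) (sl : List String) :
    func_HEPW loc sl = (List.range sl.length).map (pvEntry loc sl) := by
  unfold func_HEPW
  have hbody : (fun (HEPW : List (String × String)) (i : Int) =>
      let wd := PySem.List.pyGetD sl (i - 1) ""
      let curr_wd := PySem.List.pyGetD sl i ""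
      let const_with_wd := loc.filter (fun c => pvLastW c.2 == wd && c.1 != "S")
      match PySem.List.max? const_with_wd pvKey with
      | some m => HEPW ++ [(curr_wd, m.1)]
      | none => HEPW ++ [(curr_wd, "NONE")]) =
      (fun HEPW i => HEPW ++ [(PySem.List.pyGetD sl i "",
        pvTagOf (pvBuildBest loc) (PySem.List.pyGetD sl (i - 1) ""))]) := by
    funext H i
    rw [← pvTag_eq]
    show (match pvSel loc (PySem.List.pyGetD sl (i - 1) "") with
      | some m => H ++ [(PySem.List.pyGetD sl i "", m.1)]
      | none => H ++ [(PySem.List.pyGetD sl i "", "NONE")]) = _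
    cases pvSel loc (PySem.List.pyGetD sl (i - 1) "") <;> rfl
  rw [hbody, PySem.List.foldl_append_singleton_eq_map, List.nil_append,
      PySem.List.pyRange_one, List.map_map]
  apply List.map_congr_left
  intro k _
  simp [pvEntry, Function.comp]

theorem pvB_map (loc : List (String × String)) (sl : List String) :
    func_HEPW_alt loc sl = (List.range sl.length).map (pvEntry loc sl) := by
  unfold func_HEPW_alt
  rw [PySem.List.slice_from_neg_one, PySem.List.slice_to_neg_one]
  cases hsl : sl with
  | nil => rfl
  | cons x t =>
    rw [← hsl]
    have hne : sl ≠ [] := by rw [hsl]; exact List.cons_ne_nil _ _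
    have hlen1 : 1 ≤ sl.length := by rw [hsl]; simp
    have hd : (sl.drop (sl.length - 1)).length = 1 := by
      rw [List.length_drop]; omega
    have hprevlen : (sl.drop (sl.length - 1) ++ sl.dropLast).length = sl.length := by
      rw [List.length_append, hd, List.length_dropLast]; omega
    apply List.ext_getElem
    · simp [hprevlen]
    · intro k hk1 hk2
      have hk : k < sl.length := by simpa using hk2
      rw [List.getElem_map, List.getElem_map, List.getElem_range, List.getElem_zip]
      show ((sl[k]'(by omega)), pvTagOf (pvBuildBest loc)
        ((sl.drop (sl.length - 1) ++ sl.dropLast)[k]'(by rw [hprevlen]; exact hk))) = pvEntry loc sl k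
      have hcur : PySem.List.pyGetD sl (k : Int) "" = sl[k] := by
        rw [PySem.List.pyGetD_natCast, List.getD_eq_getElem?_getD, List.getElem?_eq_getElem hk]
        rfl
      have hprev : (sl.drop (sl.length - 1) ++ sl.dropLast)[k]'(by rw [hprevlen]; exact hk) =
          PySem.List.pyGetD sl ((k : Int) - 1) "" := by
        cases k with
        | zero =>
          have h0 : (((0 : Nat) : Int) - 1) = (-1 : Int) := by norm_num
          rw [h0, PySem.List.pyGetD_neg_one sl "" hne]
          rw [List.getElem_append_left (by rw [hd]; omega)]
          rw [List.getLast_eq_getElem, List.getElem_drop]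
          simp
        | succ j =>
          have hcast : ((j + 1 : Nat) : Int) - 1 = ((j : Nat) : Int) := by push_cast; ring
          rw [hcast, PySem.List.pyGetD_natCast]
          rw [List.getElem_append_right (by rw [hd]; omega)]
          rw [List.getElem_dropLast]
          rw [List.getD_eq_getElem?_getD, List.getElem?_eq_getElem (by omega : j < sl.length)]
          simp [hd]
      rw [hprev, ← hcur]
      rfl

theorem func_HEPW_spec : Claim_equal_func_HEPW := by
  intro loc sl _
  unfold Spec_func_HEPW
  rw [pvA_map, pvB_map]
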